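-- pv_equiv track=rewrite | github.com/maniakiemby/Androidd-app-with-push-notifications | database.py | sort_tasks_by_date
-- ===== SOURCE A (Python) =====
-- def sort_tasks_by_date(_dict: dict) -> dict:
--     list_tasks = []
--     list_tasks_without_date = []
--     for index, value in _dict.items():
--         if value[1] != 'None' and value[1] is not None:
--             list_tasks.append((index, value[0], value[1]))
--         else:
--             list_tasks_without_date.append((index, value[0], value[1]))
--     list_tasks.sort(key=lambda val: val[2])
--
--     _dict.clear()
--     for task_group in list_tasks:
--         _dict[task_group[0]] = [task_group[1], task_group[2]]
--     for task_group in list_tasks_without_date: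
--         _dict[task_group[0]] = [task_group[1], task_group[2]]
--
--     return _dict
-- ===== SOURCE B (Python) =====
-- def sort_tasks_by_date(_dict: dict) -> dict:
--     def key(item):
--         date = item[1][1]
--         if date != 'None' and date is not None:
--             return (0, date)
--         return (1, '')
--
--     ordered = sorted(_dict.items(), key=key)
--     _dict.clear()
--     for index, value in ordered:
--         _dict[index] = [value[0], value[1]]
--     return _dict
-- ===== Notes on version B (the rewrite author's own statement) =====
-- stated objective: simpler
-- what changed: Replaces A's partition into two lists + separate sort of the dated list + two rebuild loops by one stable sort of all items under the combined key (0, date) for dated / (1, '') for undated entries, followed by a single rebuild loop.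
import Mathlib
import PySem

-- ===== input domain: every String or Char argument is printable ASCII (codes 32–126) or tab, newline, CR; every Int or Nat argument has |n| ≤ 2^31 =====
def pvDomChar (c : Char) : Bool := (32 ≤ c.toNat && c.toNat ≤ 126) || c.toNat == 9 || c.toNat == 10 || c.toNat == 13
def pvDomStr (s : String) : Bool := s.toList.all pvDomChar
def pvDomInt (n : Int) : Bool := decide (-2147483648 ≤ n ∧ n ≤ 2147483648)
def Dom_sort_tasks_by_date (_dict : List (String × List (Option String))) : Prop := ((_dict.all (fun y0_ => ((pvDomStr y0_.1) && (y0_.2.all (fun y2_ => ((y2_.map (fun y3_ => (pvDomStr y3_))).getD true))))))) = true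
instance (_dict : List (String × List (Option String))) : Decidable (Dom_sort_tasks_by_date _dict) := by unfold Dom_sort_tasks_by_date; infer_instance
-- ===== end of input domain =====

-- B replaces A's partition + separate sort + two rebuild loops by ONE stable sort under the
-- combined key (0, date)/(1, "") and one rebuild loop (objective: simpler).
-- A mutates its argument dict in place and returns it; the equivalence proved here is about
-- the RETURN value (the Lean ports are pure; B performs the same in-place mutation in Python).
-- In both ports the sort key is the date string itself (`.getD ""`): Python compares the raw
-- strings there, and every compared entry carries `some s`, so this is exact.

-- ===== PORT A =====
def sort_tasks_by_date (_dict : List (String × List (Option String))) : List (String × List (Option String)) :=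
  -- partition loop over _dict.items(); value[0]/value[1] are pyGet? (Pre_ keeps them in range)
  let parts := _dict.foldl
    (fun (acc : List (String × Option String × Option String) × List (String × Option String × Option String)) p =>
      if (PySem.List.pyGet? p.2 1).getD none ≠ some "None" ∧ (PySem.List.pyGet? p.2 1).getD none ≠ none then
        (acc.1 ++ [(p.1, (PySem.List.pyGet? p.2 0).getD none, (PySem.List.pyGet? p.2 1).getD none)], acc.2)
      else
        (acc.1, acc.2 ++ [(p.1, (PySem.List.pyGet? p.2 0).getD none, (PySem.List.pyGet? p.2 1).getD none)]))
    ([], [])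
  let list_tasks := PySem.List.sorted parts.1 (fun t => t.2.2.getD "") false
  -- _dict.clear(); then the two rebuild loops
  let d1 := list_tasks.foldl
    (fun (d : PySem.Dict String (List (Option String))) t => d.insert t.1 [t.2.1, t.2.2]) PySem.Dict.empty
  (parts.2.foldl (fun d t => d.insert t.1 [t.2.1, t.2.2]) d1).items

-- ===== PORT B =====
-- key(item): (0, date) for dated items, (1, '') for undated ones
def pvTag (p : String × List (Option String)) : Int :=
  if (PySem.List.pyGet? p.2 1).getD none ≠ some "None" ∧ (PySem.List.pyGet? p.2 1).getD none ≠ none then 0 else 1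

def pvDateKey (p : String × List (Option String)) : String :=
  if (PySem.List.pyGet? p.2 1).getD none ≠ some "None" ∧ (PySem.List.pyGet? p.2 1).getD none ≠ none then
    ((PySem.List.pyGet? p.2 1).getD none).getD "" else ""

def sort_tasks_by_date_alt (_dict : List (String × List (Option String))) : List (String × List (Option String)) :=
  let ordered := PySem.List.sorted2 _dict pvTag pvDateKey false
  -- _dict.clear(); single rebuild loop
  (ordered.foldl
    (fun (d : PySem.Dict String (List (Option String))) p =>
      d.insert p.1 [(PySem.List.pyGet? p.2 0).getD none, (PySem.List.pyGet? p.2 1).getD none])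
    PySem.Dict.empty).items

-- ===== PRECONDITION & SPEC =====
-- Pre_ excludes (a) entries whose value list has fewer than two elements — Python A raises
-- IndexError on value[1] there — and (b) association lists with duplicate keys, which no
-- Python dict (A's actual argument type) can realize.
def Pre_sort_tasks_by_date (_dict : List (String × List (Option String))) : Prop :=
  (∀ p ∈ _dict, 2 ≤ p.2.length) ∧ (_dict.map Prod.fst).Nodup
instance (_dict : List (String × List (Option String))) : Decidable (Pre_sort_tasks_by_date _dict) := by unfold Pre_sort_tasks_by_date; infer_instance

def pvWitness_sort_tasks_by_date : (List (String × List (Option String))) :=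
  [("a", [some "wash", some "2024-05-01"]), ("b", [some "idle", none]), ("c", [some "shop", some "2023-12-31"])]

def Spec_sort_tasks_by_date (_dict : List (String × List (Option String))) (out : List (String × List (Option String))) : Prop := out = sort_tasks_by_date_alt _dict
instance (_dict : List (String × List (Option String))) (out : List (String × List (Option String))) : Decidable (Spec_sort_tasks_by_date _dict out) := by unfold Spec_sort_tasks_by_date; infer_instance

-- ===== CLAIM (what is proved, stated in full; the proofs are below) =====
def Claim_equal_sort_tasks_by_date : Prop := ∀ (_dict : List (String × List (Option String))), Dom_sort_tasks_by_date _dict → Pre_sort_tasks_by_date _dict → Spec_sort_tasks_by_date _dict (sort_tasks_by_date _dict)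

-- ===== LEMMAS AND PROOFS =====

-- the triple (index, value[0], value[1]) A's partition loop builds from an item
def pvF (p : String × List (Option String)) : String × Option String × Option String :=
  (p.1, (PySem.List.pyGet? p.2 0).getD none, (PySem.List.pyGet? p.2 1).getD none)

-- A's branch condition, as a Bool
def pvDatedB (p : String × List (Option String)) : Bool :=
  decide ((PySem.List.pyGet? p.2 1).getD none ≠ some "None" ∧ (PySem.List.pyGet? p.2 1).getD none ≠ none)

-- A's sort key, transported through pvF
def pvKd (p : String × List (Option String)) : String :=
  ((PySem.List.pyGet? p.2 1).getD none).getD ""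

theorem pv_insertBy_nil {α : Type} (b : α → α → Bool) (x : α) :
    PySem.List.insertBy b x [] = [x] := rfl

theorem pv_insertBy_cons {α : Type} (b : α → α → Bool) (x y : α) (ys : List α) :
    PySem.List.insertBy b x (y :: ys) =
      if b x y then x :: y :: ys else y :: PySem.List.insertBy b x ys := rfl

theorem pv_insertBy_append {α : Type} (b : α → α → Bool) (x : α) (D U : List α)
    (hU : ∀ u ∈ U, b x u = true) :
    PySem.List.insertBy b x (D ++ U) = PySem.List.insertBy b x D ++ U := by
  induction D with
  | nil =>
    cases U with
    | nil => rfl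
    | cons u U' => simp [pv_insertBy_cons, pv_insertBy_nil, hU u (by simp)]
  | cons y D' ih =>
    simp only [List.cons_append, pv_insertBy_cons]
    by_cases h : b x y = true
    · simp [h]
    · simp [h, ih]

theorem pv_insertBy_congr {α : Type} (b b' : α → α → Bool) (x : α) (D : List α)
    (h : ∀ y ∈ D, b x y = b' x y) :
    PySem.List.insertBy b x D = PySem.List.insertBy b' x D := by
  induction D with
  | nil => rfl
  | cons y D' ih =>
    simp only [pv_insertBy_cons, h y (by simp)]
    by_cases hy : b' x y = true
    · simp [hy]
    · simp [hy, ih (fun z hz => h z (by simp [hz]))]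

theorem pv_insertBy_map {α β : Type} (b : β → β → Bool) (f : α → β) (x : α) (L : List α) :
    PySem.List.insertBy b (f x) (L.map f) =
      (PySem.List.insertBy (fun a c => b (f a) (f c)) x L).map f := by
  induction L with
  | nil => rfl
  | cons y L' ih =>
    simp only [List.map_cons, pv_insertBy_cons]
    by_cases h : b (f x) (f y) = true
    · simp [h]
    · simp [h, ih]

theorem pv_foldl_insertBy_map {α β : Type} (b : β → β → Bool) (f : α → β) (l : List α) :
    ∀ acc : List α,
      (l.map f).foldl (fun acc x => PySem.List.insertBy b x acc) (acc.map f) =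
        (l.foldl (fun acc x => PySem.List.insertBy (fun a c => b (f a) (f c)) x acc) acc).map f := by
  induction l with
  | nil => intro acc; rfl
  | cons y l' ih =>
    intro acc
    simp only [List.map_cons, List.foldl_cons]
    rw [pv_insertBy_map b f y acc]
    exact ih _

theorem pv_sorted_map {α β : Type} (f : α → β) (key : β → String) (l : List α) :
    PySem.List.sorted (l.map f) key false =
      (PySem.List.sorted l (fun p => key (f p)) false).map f := by
  show (l.map f).foldl (fun acc x => PySem.List.insertBy (fun a c => decide (key a < key c)) x acc) ([].map f) = _
  rw [pv_foldl_insertBy_map]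
  rfl

-- A's partition loop, characterized
theorem pv_partition (l : List (String × List (Option String)))
    (a c : List (String × Option String × Option String)) :
    l.foldl
      (fun (acc : List (String × Option String × Option String) × List (String × Option String × Option String)) p =>
        if (PySem.List.pyGet? p.2 1).getD none ≠ some "None" ∧ (PySem.List.pyGet? p.2 1).getD none ≠ none then
          (acc.1 ++ [(p.1, (PySem.List.pyGet? p.2 0).getD none, (PySem.List.pyGet? p.2 1).getD none)], acc.2)
        else
          (acc.1, acc.2 ++ [(p.1, (PySem.List.pyGet? p.2 0).getD none, (PySem.List.pyGet? p.2 1).getD none)]))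
      (a, c) =
    (a ++ (l.filter pvDatedB).map pvF, c ++ (l.filter (fun p => !pvDatedB p)).map pvF) := by
  induction l generalizing a c with
  | nil => simp
  | cons p l' ih =>
    by_cases h : (PySem.List.pyGet? p.2 1).getD none ≠ some "None" ∧ (PySem.List.pyGet? p.2 1).getD none ≠ none
    · simp only [List.foldl_cons, if_pos h, ih, List.filter_cons]
      have hb : pvDatedB p = true := by simp [pvDatedB, h]
      simp [hb, pvF]
    · simp only [List.foldl_cons, if_neg h, ih, List.filter_cons]
      have hb : pvDatedB p = false := by simp [pvDatedB]; tauto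
      simp [hb, pvF]

-- facts about B's combined comparator
theorem pv_lt_dated_dated (x y : String × List (Option String))
    (hx : pvDatedB x = true) (hy : pvDatedB y = true) :
    (decide (pvTag x < pvTag y) || !decide (pvTag y < pvTag x) && decide (pvDateKey x < pvDateKey y)) =
      decide (pvKd x < pvKd y) := by
  simp only [pvDatedB, decide_eq_true_eq] at hx hy
  simp [pvTag, pvDateKey, pvKd, hx, hy]

theorem pv_lt_dated_undated (x y : String × List (Option String))
    (hx : pvDatedB x = true) (hy : pvDatedB y = false) :
    (decide (pvTag x < pvTag y) || !decide (pvTag y < pvTag x) && decide (pvDateKey x < pvDateKey y)) = true := by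
  simp only [pvDatedB, decide_eq_true_eq, decide_eq_false_iff_not] at hx hy
  simp [pvTag, pvDateKey, hx, hy]

theorem pv_lt_undated (x y : String × List (Option String))
    (hx : pvDatedB x = false) :
    (decide (pvTag x < pvTag y) || !decide (pvTag y < pvTag x) && decide (pvDateKey x < pvDateKey y)) = false := by
  simp only [pvDatedB, decide_eq_false_iff_not] at hx
  by_cases hy : (PySem.List.pyGet? y.2 1).getD none ≠ some "None" ∧ (PySem.List.pyGet? y.2 1).getD none ≠ none
  · simp [pvTag, pvDateKey, hx, hy]
  · simp [pvTag, pvDateKey, hx, hy]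

-- the single stable sort under the combined key IS "sorted dated ++ untouched undated"
theorem pv_split (l : List (String × List (Option String))) :
    PySem.List.sorted2 l pvTag pvDateKey false =
      PySem.List.sorted (l.filter pvDatedB) pvKd false ++ l.filter (fun p => !pvDatedB p) := by
  induction l using List.reverseRecOn with
  | nil => rfl
  | append_singleton l' x ih =>
    have hlhs : PySem.List.sorted2 (l' ++ [x]) pvTag pvDateKey false =
        PySem.List.insertBy
          (fun a b => decide (pvTag a < pvTag b) || !decide (pvTag b < pvTag a) && decide (pvDateKey a < pvDateKey b))
          x (PySem.List.sorted2 l' pvTag pvDateKey false) := by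
      show (l' ++ [x]).foldl _ [] = _
      rw [List.foldl_append]
      rfl
    have hD : ∀ y ∈ PySem.List.sorted (l'.filter pvDatedB) pvKd false, pvDatedB y = true := by
      intro y hy
      rw [PySem.List.mem_sorted] at hy
      exact (List.mem_filter.1 hy).2
    have hU : ∀ y ∈ l'.filter (fun p => !pvDatedB p), pvDatedB y = false := by
      intro y hy
      simpa using (List.mem_filter.1 hy).2
    rw [hlhs, ih]
    by_cases hx : pvDatedB x = true
    · rw [pv_insertBy_append _ _ _ _ (fun u hu => pv_lt_dated_undated x u hx (hU u hu)),
        pv_insertBy_congr _ (fun a b => decide (pvKd a < pvKd b)) x _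
          (fun y hy => pv_lt_dated_dated x y hx (hD y hy))]
      have hsx : PySem.List.sorted (l'.filter pvDatedB ++ [x]) pvKd false =
          PySem.List.insertBy (fun a b => decide (pvKd a < pvKd b)) x
            (PySem.List.sorted (l'.filter pvDatedB) pvKd false) := by
        show (l'.filter pvDatedB ++ [x]).foldl _ [] = _
        rw [List.foldl_append]
        rfl
      simp [List.filter_append, hx, hsx]
    · replace hx : pvDatedB x = false := by simpa using hx
      have hall : ∀ y ∈ (PySem.List.sorted (l'.filter pvDatedB) pvKd false ++ l'.filter (fun p => !pvDatedB p)),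
          (decide (pvTag x < pvTag y) || !decide (pvTag y < pvTag x) && decide (pvDateKey x < pvDateKey y)) = false :=
        fun y _ => pv_lt_undated x y hx
      rw [PySem.List.insertBy_of_forall_not_before _ _ _ hall]
      simp [List.filter_append, hx]

-- ===== VERDICT (by name: the statement is the Claim_ definition above) =====
theorem sort_tasks_by_date_spec : Claim_equal_sort_tasks_by_date := by
  intro l _ _
  unfold Spec_sort_tasks_by_date sort_tasks_by_date sort_tasks_by_date_alt
  rw [pv_partition l [] []]
  simp only [List.nil_append]
  rw [pv_sorted_map pvF (fun t => t.2.2.getD "") (l.filter pvDatedB)]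
  rw [← List.foldl_append]
  have hkey : (PySem.List.sorted (l.filter pvDatedB) (fun p => (pvF p).2.2.getD "") false) =
      PySem.List.sorted (l.filter pvDatedB) pvKd false := rfl
  rw [hkey, ← List.map_append, ← pv_split l, List.foldl_map]
  rfl
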